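-- pv_equiv track=rewrite | github.com/Hithru/IEEEXtreme | HackerRank/ProblemSolving/MarcCakeWalk.py | cake_walk
-- ===== SOURCE A (Python) =====
-- from typing import List
--
-- def cake_walk(calorie: List[int]):
--     answer = 0
--     power = 1
--     calorie.sort(reverse=True)
--     for cal in calorie:
--         answer += power * cal
--         power *= 2
--     return answer
-- ===== SOURCE B (Python) =====
-- from typing import List
--
-- def cake_walk(calorie: List[int]):
--     calorie.sort(reverse=True)
--     acc = 0
--     for cal in reversed(calorie):
--         acc = acc * 2 + cal
--     return acc
-- ===== Notes on version B (the rewrite author's own statement) =====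
-- stated objective: simpler
-- what changed: Replaces the explicit power-of-two accumulator with Horner's method: iterate the sorted list smallest-to-largest and fold with acc = acc*2 + cal, eliminating the separate power variable.
import Mathlib
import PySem

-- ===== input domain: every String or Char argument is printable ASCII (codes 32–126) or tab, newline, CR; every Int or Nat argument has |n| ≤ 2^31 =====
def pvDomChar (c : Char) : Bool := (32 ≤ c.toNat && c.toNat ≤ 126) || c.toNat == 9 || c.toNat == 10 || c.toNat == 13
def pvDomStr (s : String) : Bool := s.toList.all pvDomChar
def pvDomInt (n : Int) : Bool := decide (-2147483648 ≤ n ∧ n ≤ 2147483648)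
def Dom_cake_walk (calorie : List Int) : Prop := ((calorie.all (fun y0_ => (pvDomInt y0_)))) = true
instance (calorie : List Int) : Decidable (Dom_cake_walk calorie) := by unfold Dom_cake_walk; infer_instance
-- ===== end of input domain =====

-- B replaces the explicit power-of-two accumulator with a Horner fold over the reversed sorted list (same in-place sort mutation as A); equivalence is about the return value.


-- ===== PORT A =====
-- Port of A: sort descending, then one pass accumulating answer and power.
def cake_walk (calorie : List Int) : Int :=
  let s := PySem.List.sorted calorie (fun x => x) true
  (s.foldl (fun st cal => (st.1 + st.2 * cal, st.2 * 2)) ((0 : Int), (1 : Int))).1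

-- ===== PORT B =====
-- Port of B: sort descending, Horner fold over the reversed (ascending) list.
def cake_walk_alt (calorie : List Int) : Int :=
  let s := PySem.List.sorted calorie (fun x => x) true
  s.reverse.foldl (fun acc cal => acc * 2 + cal) 0

-- ===== PRECONDITION & SPEC =====
def Spec_cake_walk (calorie : List Int) (out : Int) : Prop := out = cake_walk_alt calorie
instance (calorie : List Int) (out : Int) : Decidable (Spec_cake_walk calorie out) := by unfold Spec_cake_walk; infer_instance

-- ===== CLAIM (what is proved, stated in full; the proofs are below) =====
def Claim_equal_cake_walk : Prop := ∀ (calorie : List Int), Dom_cake_walk calorie → Spec_cake_walk calorie (cake_walk calorie)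

-- ===== LEMMAS AND PROOFS =====

-- ===== VERDICT (by name: the statement is the Claim_ definition above) =====
-- foldl with (answer, power) state equals answer + power * Horner value of the reversed list
lemma cake_pair_horner (l : List Int) : ∀ (a p : Int),
    (l.foldl (fun st cal => (st.1 + st.2 * cal, st.2 * 2)) (a, p)).1
      = a + p * (l.reverse.foldl (fun acc cal => acc * 2 + cal) 0) := by
  induction l with
  | nil => intro a p; simp
  | cons c t ih =>
      intro a p
      simp only [List.foldl_cons, List.reverse_cons, List.foldl_append, List.foldl_cons,
        List.foldl_nil, ih]
      ring

theorem cake_walk_spec : Claim_equal_cake_walk := by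
  intro calorie _
  unfold Spec_cake_walk cake_walk cake_walk_alt
  simp [cake_pair_horner]
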